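-- pv_equiv track=rewrite | github.com/AryanChaks/AI-agent-for-footwear-System- | backend/nodes/reply_handler.py | _parse_reply_output
-- ===== SOURCE A (Python) =====
-- def _parse_reply_output(raw: str) -> tuple:
--     sentiment = "Neutral"
--     next_action = "Follow-up"
--     response_lines = []
--     in_response = False
--
--     for line in raw.strip().split("\n"):
--         if line.startswith("SENTIMENT:"):
--             sentiment = line.replace("SENTIMENT:", "").strip()
--         elif line.startswith("NEXT_ACTION:"):
--             next_action = line.replace("NEXT_ACTION:", "").strip()
--         elif line.startswith("SUGGESTED_RESPONSE:"):
--             in_response = True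
--         elif in_response:
--             response_lines.append(line)
--
--     response = "\n".join(response_lines).strip() if response_lines else raw.strip()
--     return sentiment, next_action, response
-- ===== SOURCE B (Python) =====
-- def _parse_reply_output(raw: str) -> tuple:
--     lines = raw.strip().split("\n")
--     TAGS = ("SENTIMENT:", "NEXT_ACTION:", "SUGGESTED_RESPONSE:")
--
--     def last_tag(tag, default):
--         return next((l.replace(tag, "").strip()
--                      for l in reversed(lines) if l.startswith(tag)), default)
--
--     sentiment = last_tag("SENTIMENT:", "Neutral")
--     next_action = last_tag("NEXT_ACTION:", "Follow-up")
--
--     idx = next((i for i, l in enumerate(lines)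
--                 if l.startswith("SUGGESTED_RESPONSE:")), None)
--     body = [] if idx is None else [l for l in lines[idx + 1:]
--                                    if not l.startswith(TAGS)]
--     response = "\n".join(body).strip() if body else raw.strip()
--     return sentiment, next_action, response
-- ===== Notes on version B (the rewrite author's own statement) =====
-- stated objective: alternative
-- what changed: A's single forward stateful loop (sentiment/action overwritten in place, an in_response flag gating accumulation) is replaced by independent passes: reverse searches for the last SENTIMENT:/NEXT_ACTION: line, a find-index of the first SUGGESTED_RESPONSE: line, and a filter comprehension over the remaining lines for the body.
import Mathlib
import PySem

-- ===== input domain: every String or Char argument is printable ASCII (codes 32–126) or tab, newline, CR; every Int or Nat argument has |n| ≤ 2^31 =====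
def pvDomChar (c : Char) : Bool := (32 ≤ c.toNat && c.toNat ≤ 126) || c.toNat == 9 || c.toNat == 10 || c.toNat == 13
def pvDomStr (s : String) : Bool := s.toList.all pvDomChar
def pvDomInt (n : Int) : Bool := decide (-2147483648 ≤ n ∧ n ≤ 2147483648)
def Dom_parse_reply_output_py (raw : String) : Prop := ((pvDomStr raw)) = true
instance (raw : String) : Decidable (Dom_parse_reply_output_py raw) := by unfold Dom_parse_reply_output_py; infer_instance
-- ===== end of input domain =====

-- B replaces A's single stateful forward loop by independent passes: last-match reverse
-- searches for the two tags and a find-index + filter for the response body (objective: simpler).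

-- ===== PORT A =====
-- state: (sentiment, next_action, response_lines, in_response)
def pvStepA (s : String × String × List String × Bool) (line : String) :
    String × String × List String × Bool :=
  if PySem.Str.startswith line "SENTIMENT:" then
    (PySem.Str.strip (PySem.Str.replace line "SENTIMENT:" ""), s.2.1, s.2.2.1, s.2.2.2)
  else if PySem.Str.startswith line "NEXT_ACTION:" then
    (s.1, PySem.Str.strip (PySem.Str.replace line "NEXT_ACTION:" ""), s.2.2.1, s.2.2.2)
  else if PySem.Str.startswith line "SUGGESTED_RESPONSE:" then
    (s.1, s.2.1, s.2.2.1, true)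
  else if s.2.2.2 then
    (s.1, s.2.1, s.2.2.1 ++ [line], s.2.2.2)
  else s

def parse_reply_output_py (raw : String) : String × String × String :=
  -- split? "\n" is some since the separator is nonempty; getD [] is exact here
  let st := ((PySem.Str.split? (PySem.Str.strip raw) "\n").getD []).foldl pvStepA
      (("Neutral", "Follow-up", [], false) : String × String × List String × Bool)
  let response :=
    if st.2.2.1.isEmpty then PySem.Str.strip raw
    else PySem.Str.strip (PySem.Str.join "\n" st.2.2.1)
  (st.1, st.2.1, response)

-- ===== PORT B =====
def pvIsTag (l : String) : Bool :=
  PySem.Str.startswith l "SENTIMENT:" || PySem.Str.startswith l "NEXT_ACTION:" ||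
    PySem.Str.startswith l "SUGGESTED_RESPONSE:"

-- next((l.replace(tag,"").strip() for l in reversed(lines) if l.startswith(tag)), default)
def pvLastTag (lines : List String) (tag default : String) : String :=
  match lines.reverse.find? (fun l => PySem.Str.startswith l tag) with
  | some l => PySem.Str.strip (PySem.Str.replace l tag "")
  | none => default

def parse_reply_output_py_alt (raw : String) : String × String × String :=
  let lines := (PySem.Str.split? (PySem.Str.strip raw) "\n").getD []
  let sentiment := pvLastTag lines "SENTIMENT:" "Neutral"
  let next_action := pvLastTag lines "NEXT_ACTION:" "Follow-up"
  let body :=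
    match lines.findIdx? (fun l => PySem.Str.startswith l "SUGGESTED_RESPONSE:") with
    | some i => (lines.drop (i + 1)).filter (fun l => !pvIsTag l)
    | none => []
  let response :=
    if body.isEmpty then PySem.Str.strip raw
    else PySem.Str.strip (PySem.Str.join "\n" body)
  (sentiment, next_action, response)

-- ===== PRECONDITION & SPEC =====
def Spec_parse_reply_output_py (raw : String) (out : String × String × String) : Prop := out = parse_reply_output_py_alt raw
instance (raw : String) (out : String × String × String) : Decidable (Spec_parse_reply_output_py raw out) := by unfold Spec_parse_reply_output_py; infer_instance

-- ===== CLAIM (what is proved, stated in full; the proofs are below) =====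
def Claim_equal_parse_reply_output_py : Prop := ∀ (raw : String), Dom_parse_reply_output_py raw → Spec_parse_reply_output_py raw (parse_reply_output_py raw)

-- ===== LEMMAS AND PROOFS =====

theorem pvBfalse {b : Bool} (h : b = false) : ¬(b = true) := by
  rw [h]; exact Bool.false_ne_true

-- the three tag prefixes are mutually exclusive on any line (they differ within the first 5 chars)
theorem pvSent_not_sugg (l : String) (h : PySem.Str.startswith l "SENTIMENT:" = true) :
    PySem.Str.startswith l "SUGGESTED_RESPONSE:" = false := by
  by_contra hc
  rw [Bool.not_eq_false] at hc
  have h1 := (PySem.Chars.startswith_iff _ _).mp (by simpa using h)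
  have h2 := (PySem.Chars.startswith_iff _ _).mp (by simpa using hc)
  exact absurd (List.prefix_of_prefix_length_le h1 h2 (by decide)) (by decide)

theorem pvNext_not_sugg (l : String) (h : PySem.Str.startswith l "NEXT_ACTION:" = true) :
    PySem.Str.startswith l "SUGGESTED_RESPONSE:" = false := by
  by_contra hc
  rw [Bool.not_eq_false] at hc
  have h1 := (PySem.Chars.startswith_iff _ _).mp (by simpa using h)
  have h2 := (PySem.Chars.startswith_iff _ _).mp (by simpa using hc)
  exact absurd (List.prefix_of_prefix_length_le h1 h2 (by decide)) (by decide)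

theorem pvNext_not_sent (l : String) (h : PySem.Str.startswith l "NEXT_ACTION:" = true) :
    PySem.Str.startswith l "SENTIMENT:" = false := by
  by_contra hc
  rw [Bool.not_eq_false] at hc
  have h1 := (PySem.Chars.startswith_iff _ _).mp (by simpa using h)
  have h2 := (PySem.Chars.startswith_iff _ _).mp (by simpa using hc)
  exact absurd (List.prefix_of_prefix_length_le h2 h1 (by decide)) (by decide)

-- one-step reductions of A's loop body
theorem pvStepA_sent (s : String × String × List String × Bool) (l : String)
    (h : PySem.Str.startswith l "SENTIMENT:" = true) :
    pvStepA s l = (PySem.Str.strip (PySem.Str.replace l "SENTIMENT:" ""), s.2.1, s.2.2.1, s.2.2.2) := by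
  unfold pvStepA
  rw [if_pos h]

theorem pvStepA_next (s : String × String × List String × Bool) (l : String)
    (h1 : PySem.Str.startswith l "SENTIMENT:" = false)
    (h2 : PySem.Str.startswith l "NEXT_ACTION:" = true) :
    pvStepA s l = (s.1, PySem.Str.strip (PySem.Str.replace l "NEXT_ACTION:" ""), s.2.2.1, s.2.2.2) := by
  unfold pvStepA
  rw [if_neg (pvBfalse h1), if_pos h2]

theorem pvStepA_sugg (s : String × String × List String × Bool) (l : String)
    (h1 : PySem.Str.startswith l "SENTIMENT:" = false)
    (h2 : PySem.Str.startswith l "NEXT_ACTION:" = false)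
    (h3 : PySem.Str.startswith l "SUGGESTED_RESPONSE:" = true) :
    pvStepA s l = (s.1, s.2.1, s.2.2.1, true) := by
  unfold pvStepA
  rw [if_neg (pvBfalse h1), if_neg (pvBfalse h2), if_pos h3]

theorem pvStepA_other (s : String × String × List String × Bool) (l : String)
    (h1 : PySem.Str.startswith l "SENTIMENT:" = false)
    (h2 : PySem.Str.startswith l "NEXT_ACTION:" = false)
    (h3 : PySem.Str.startswith l "SUGGESTED_RESPONSE:" = false) :
    pvStepA s l = (s.1, s.2.1, if s.2.2.2 then s.2.2.1 ++ [l] else s.2.2.1, s.2.2.2) := by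
  unfold pvStepA
  rw [if_neg (pvBfalse h1), if_neg (pvBfalse h2), if_neg (pvBfalse h3)]
  by_cases hf : s.2.2.2 = true
  · rw [if_pos hf, if_pos hf]
  · rw [if_neg hf, if_neg hf]

theorem pvFoldA_fst (lines : List String) (s : String × String × List String × Bool) :
    (lines.foldl pvStepA s).1 =
      match lines.reverse.find? (fun l => PySem.Str.startswith l "SENTIMENT:") with
      | some l => PySem.Str.strip (PySem.Str.replace l "SENTIMENT:" "")
      | none => s.1 := by
  induction lines generalizing s with
  | nil => rfl
  | cons l ls ih =>
    rw [List.foldl_cons, ih, List.reverse_cons, List.find?_append]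
    cases h : ls.reverse.find? (fun l => PySem.Str.startswith l "SENTIMENT:") with
    | some x => rw [Option.some_or]
    | none =>
      rw [Option.none_or, List.find?_singleton]
      cases hp : PySem.Str.startswith l "SENTIMENT:" with
      | true => rw [pvStepA_sent s l hp]; simp
      | false =>
        simp only [Bool.false_eq_true, if_false]
        cases hn : PySem.Str.startswith l "NEXT_ACTION:" with
        | true => rw [pvStepA_next s l hp hn]
        | false =>
          cases hg : PySem.Str.startswith l "SUGGESTED_RESPONSE:" with
          | true => rw [pvStepA_sugg s l hp hn hg]
          | false => rw [pvStepA_other s l hp hn hg]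

theorem pvFoldA_snd (lines : List String) (s : String × String × List String × Bool) :
    (lines.foldl pvStepA s).2.1 =
      match lines.reverse.find? (fun l => PySem.Str.startswith l "NEXT_ACTION:") with
      | some l => PySem.Str.strip (PySem.Str.replace l "NEXT_ACTION:" "")
      | none => s.2.1 := by
  induction lines generalizing s with
  | nil => rfl
  | cons l ls ih =>
    rw [List.foldl_cons, ih, List.reverse_cons, List.find?_append]
    cases h : ls.reverse.find? (fun l => PySem.Str.startswith l "NEXT_ACTION:") with
    | some x => rw [Option.some_or]
    | none =>
      rw [Option.none_or, List.find?_singleton]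
      cases hn : PySem.Str.startswith l "NEXT_ACTION:" with
      | true => rw [pvStepA_next s l (pvNext_not_sent l hn) hn]; simp
      | false =>
        simp only [Bool.false_eq_true, if_false]
        cases hp : PySem.Str.startswith l "SENTIMENT:" with
        | true => rw [pvStepA_sent s l hp]
        | false =>
          cases hg : PySem.Str.startswith l "SUGGESTED_RESPONSE:" with
          | true => rw [pvStepA_sugg s l hp hn hg]
          | false => rw [pvStepA_other s l hp hn hg]

-- the response-lines a run of A's loop over `lines` adds, as a function of the in_response flag
def pvBodyExpr (flag : Bool) (lines : List String) : List String :=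
  if flag then lines.filter (fun l => !pvIsTag l)
  else
    match lines.findIdx? (fun l => PySem.Str.startswith l "SUGGESTED_RESPONSE:") with
    | some i => (lines.drop (i + 1)).filter (fun l => !pvIsTag l)
    | none => []

theorem pvBodyExpr_cons_tag (flag : Bool) (l : String) (ls : List String)
    (htag : pvIsTag l = true)
    (hsugg : PySem.Str.startswith l "SUGGESTED_RESPONSE:" = false) :
    pvBodyExpr flag (l :: ls) = pvBodyExpr flag ls := by
  cases flag with
  | true =>
    show (l :: ls).filter (fun l => !pvIsTag l) = ls.filter (fun l => !pvIsTag l)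
    rw [List.filter_cons_of_neg (by simp [htag])]
  | false =>
    unfold pvBodyExpr
    simp only [Bool.false_eq_true, if_false, List.findIdx?_cons]
    rw [if_neg (pvBfalse hsugg)]
    cases ls.findIdx? (fun l => PySem.Str.startswith l "SUGGESTED_RESPONSE:") with
    | some i => simp only [Option.map_some, List.drop_succ_cons]
    | none => rfl

theorem pvBodyExpr_cons_sugg (flag : Bool) (l : String) (ls : List String)
    (htag : pvIsTag l = true)
    (hsugg : PySem.Str.startswith l "SUGGESTED_RESPONSE:" = true) :
    pvBodyExpr flag (l :: ls) = pvBodyExpr true ls := by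
  cases flag with
  | true =>
    show (l :: ls).filter (fun l => !pvIsTag l) = ls.filter (fun l => !pvIsTag l)
    rw [List.filter_cons_of_neg (by simp [htag])]
  | false =>
    unfold pvBodyExpr
    simp only [Bool.false_eq_true, if_false, List.findIdx?_cons]
    rw [if_pos hsugg]
    simp

theorem pvBodyExpr_cons_other (flag : Bool) (l : String) (ls : List String)
    (htag : pvIsTag l = false)
    (hsugg : PySem.Str.startswith l "SUGGESTED_RESPONSE:" = false) :
    pvBodyExpr flag (l :: ls) =
      if flag then l :: pvBodyExpr true ls else pvBodyExpr false ls := by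
  cases flag with
  | true =>
    show (l :: ls).filter (fun l => !pvIsTag l) = l :: ls.filter (fun l => !pvIsTag l)
    rw [List.filter_cons_of_pos (by simp [htag])]
  | false =>
    unfold pvBodyExpr
    simp only [Bool.false_eq_true, if_false, List.findIdx?_cons]
    rw [if_neg (pvBfalse hsugg)]
    cases ls.findIdx? (fun l => PySem.Str.startswith l "SUGGESTED_RESPONSE:") with
    | some i => simp only [Option.map_some, List.drop_succ_cons]
    | none => rfl

theorem pvFoldA_body (lines : List String) (s : String × String × List String × Bool) :
    (lines.foldl pvStepA s).2.2.1 = s.2.2.1 ++ pvBodyExpr s.2.2.2 lines := by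
  induction lines generalizing s with
  | nil => cases hf : s.2.2.2 <;> simp [pvBodyExpr]
  | cons l ls ih =>
    rw [List.foldl_cons, ih]
    cases hp : PySem.Str.startswith l "SENTIMENT:" with
    | true =>
      rw [pvStepA_sent s l hp,
        pvBodyExpr_cons_tag _ l ls (by unfold pvIsTag; rw [hp]; rfl) (pvSent_not_sugg l hp)]
    | false =>
      cases hn : PySem.Str.startswith l "NEXT_ACTION:" with
      | true =>
        rw [pvStepA_next s l hp hn,
          pvBodyExpr_cons_tag _ l ls (by unfold pvIsTag; rw [hp, hn]; rfl) (pvNext_not_sugg l hn)]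
      | false =>
        cases hg : PySem.Str.startswith l "SUGGESTED_RESPONSE:" with
        | true =>
          rw [pvStepA_sugg s l hp hn hg,
            pvBodyExpr_cons_sugg _ l ls (by unfold pvIsTag; rw [hp, hn, hg]; rfl) hg]
        | false =>
          rw [pvStepA_other s l hp hn hg,
            pvBodyExpr_cons_other _ l ls (by unfold pvIsTag; rw [hp, hn, hg]; rfl) hg]
          by_cases hf : s.2.2.2 = true
          · rw [hf]
            simp
          · rw [Bool.not_eq_true] at hf
            rw [hf]
            simp

-- ===== VERDICT (by name: the statement is the Claim_ definition above) =====
set_option maxHeartbeats 1000000 in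
theorem parse_reply_output_py_spec : Claim_equal_parse_reply_output_py := by
  intro raw _
  show parse_reply_output_py raw = parse_reply_output_py_alt raw
  simp only [parse_reply_output_py, parse_reply_output_py_alt, pvLastTag,
    pvFoldA_fst, pvFoldA_snd, pvFoldA_body]
  rfl
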